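-- pv_equiv track=rewrite | github.com/react-native-skia/react-native-skia | tools/memory/partition_allocator/compute_internal_fragmentation.py | _RoundUpToNearestBucket
-- ===== SOURCE A (Python) =====
-- def _RoundUpToNearestBucket(buckets: list[int], size: int) -> int:
--   """Rounds a size up to the nearest bucket.
--
--   Args:
--     buckets: Sorted list of bucket sizes.
--     size: The size to round upwards.
--
--   Returns:
--     The closest bucket size to |size|, rounding upwards.
--   """
--   curr = None
--   for bucket_size in buckets:
--     curr = bucket_size
--     if size <= bucket_size:
--       break
--   assert curr is not None
--   return curr
-- ===== SOURCE B (Python) =====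
-- def _RoundUpToNearestBucket(buckets: list[int], size: int) -> int:
--   """Recursively find the first bucket that can hold |size|; if none can,
--   the last bucket is returned."""
--   head, *rest = buckets
--   if size <= head or not rest:
--     return head
--   return _RoundUpToNearestBucket(rest, size)
-- ===== Notes on version B (the rewrite author's own statement) =====
-- stated objective: simpler
-- what changed: Replaces A's loop with a mutable None sentinel, overwrite-then-break pattern and assert by a direct recursive decomposition: return the head if it fits or is the only bucket left, otherwise recurse on the tail; Pre_ excludes only the empty list, on which A raises AssertionError (and B raises ValueError on unpacking).
import Mathlib
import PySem

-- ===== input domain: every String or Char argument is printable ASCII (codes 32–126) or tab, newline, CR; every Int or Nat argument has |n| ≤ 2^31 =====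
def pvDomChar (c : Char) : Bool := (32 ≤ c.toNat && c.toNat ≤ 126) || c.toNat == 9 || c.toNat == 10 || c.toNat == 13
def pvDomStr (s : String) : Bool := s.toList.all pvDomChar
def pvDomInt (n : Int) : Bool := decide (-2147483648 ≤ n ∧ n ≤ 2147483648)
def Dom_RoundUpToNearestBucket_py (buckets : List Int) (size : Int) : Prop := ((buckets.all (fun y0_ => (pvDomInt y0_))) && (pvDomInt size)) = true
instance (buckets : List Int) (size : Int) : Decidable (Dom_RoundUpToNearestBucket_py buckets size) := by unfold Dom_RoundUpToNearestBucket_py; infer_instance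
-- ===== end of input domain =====

-- B replaces A's sentinel-and-break loop by a direct recursion on the list
-- (objective: simpler); same value on every nonempty list.

-- ===== PORT A =====
-- A's loop: 'curr = bucket_size; if size <= bucket_size: break'; curr : Option Int mirrors 'curr = None'.
def RoundUpToNearestBucket_py_loop (size : Int) : List Int → Option Int → Option Int
  | [], curr => curr
  | b :: rest, _ => if size ≤ b then some b else RoundUpToNearestBucket_py_loop size rest (some b)

-- 'assert curr is not None' raises on empty buckets; Pre_ excludes that input, 0 is unreachable under Pre_.
def RoundUpToNearestBucket_py (buckets : List Int) (size : Int) : Int :=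
  match RoundUpToNearestBucket_py_loop size buckets none with
  | some c => c
  | none => 0

-- ===== PORT B =====
-- head, *rest = buckets; if size <= head or not rest: return head; else recurse on rest.
-- Unpacking an empty list raises ValueError; the [] case (0) is outside Pre_.
def RoundUpToNearestBucket_py_alt (buckets : List Int) (size : Int) : Int :=
  match buckets with
  | [] => 0
  | head :: rest =>
      if size ≤ head ∨ rest = [] then head
      else RoundUpToNearestBucket_py_alt rest size

-- ===== PRECONDITION & SPEC =====
-- On empty buckets A raises AssertionError (and B raises ValueError); nothing else is excluded.
def Pre_RoundUpToNearestBucket_py (buckets : List Int) (size : Int) : Prop := buckets ≠ []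
instance (buckets : List Int) (size : Int) : Decidable (Pre_RoundUpToNearestBucket_py buckets size) := by unfold Pre_RoundUpToNearestBucket_py; infer_instance
def pvWitness_RoundUpToNearestBucket_py : List Int × Int := ([8, 16, 32], 10)

def Spec_RoundUpToNearestBucket_py (buckets : List Int) (size : Int) (out : Int) : Prop := out = RoundUpToNearestBucket_py_alt buckets size
instance (buckets : List Int) (size : Int) (out : Int) : Decidable (Spec_RoundUpToNearestBucket_py buckets size out) := by unfold Spec_RoundUpToNearestBucket_py; infer_instance

-- ===== CLAIM (what is proved, stated in full; the proofs are below) =====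
def Claim_equal_RoundUpToNearestBucket_py : Prop := ∀ (buckets : List Int) (size : Int), Dom_RoundUpToNearestBucket_py buckets size → Pre_RoundUpToNearestBucket_py buckets size → Spec_RoundUpToNearestBucket_py buckets size (RoundUpToNearestBucket_py buckets size)

-- ===== LEMMAS AND PROOFS =====

-- On a nonempty list, A's loop computes B's recursion regardless of the carried curr.
theorem pv_loop_eq_alt (size : Int) (l : List Int) (hl : l ≠ []) (c : Option Int) :
    RoundUpToNearestBucket_py_loop size l c = some (RoundUpToNearestBucket_py_alt l size) := by
  induction l generalizing c with
  | nil => exact absurd rfl hl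
  | cons b rest ih =>
    cases rest with
    | nil => simp [RoundUpToNearestBucket_py_loop, RoundUpToNearestBucket_py_alt]
    | cons b' rest' =>
      rw [show RoundUpToNearestBucket_py_loop size (b :: b' :: rest') c =
            if size ≤ b then some b
            else RoundUpToNearestBucket_py_loop size (b' :: rest') (some b) from rfl]
      rw [ih (by simp)]
      simp only [RoundUpToNearestBucket_py_alt]
      by_cases h : size ≤ b <;> simp [h]

-- ===== VERDICT (by name: the statement is the Claim_ definition above) =====
theorem RoundUpToNearestBucket_py_spec : Claim_equal_RoundUpToNearestBucket_py := by
  intro buckets size _ hpre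
  unfold Spec_RoundUpToNearestBucket_py RoundUpToNearestBucket_py
  rw [pv_loop_eq_alt size buckets hpre none]
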